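-- pv_equiv track=rewrite | github.com/yuxin101/skills | skills/jisuapi/baidu-top/get.py | _find_section
-- ===== SOURCE A (Python) =====
-- from typing import Dict, List
--
-- def _find_section(lines: List[str], title: str, end_titles: List[str]) -> List[str]:
--     start = -1
--     for i, x in enumerate(lines):
--         if title in x:
--             start = i + 1
--             break
--     if start < 0:
--         return []
--     end = len(lines)
--     for i in range(start, len(lines)):
--         if any(t in lines[i] for t in end_titles):
--             end = i
--             break
--     return lines[start:end]
-- ===== SOURCE B (Python) =====
-- from typing import Dict, List
--
-- def _find_section(lines: List[str], title: str, end_titles: List[str]) -> List[str]: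
--     section = []
--     started = False
--     for x in lines:
--         if started:
--             if any(t in x for t in end_titles):
--                 break
--             section.append(x)
--         elif title in x:
--             started = True
--     return section
-- ===== Notes on version B (the rewrite author's own statement) =====
-- stated objective: simpler
-- what changed: Replaced A's two sequential scans (index search for the title, then an indexed range scan for the first end title, then a slice) with a single pass over the lines that keeps a started-flag and an accumulator, breaking at the first end title.
import Mathlib
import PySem

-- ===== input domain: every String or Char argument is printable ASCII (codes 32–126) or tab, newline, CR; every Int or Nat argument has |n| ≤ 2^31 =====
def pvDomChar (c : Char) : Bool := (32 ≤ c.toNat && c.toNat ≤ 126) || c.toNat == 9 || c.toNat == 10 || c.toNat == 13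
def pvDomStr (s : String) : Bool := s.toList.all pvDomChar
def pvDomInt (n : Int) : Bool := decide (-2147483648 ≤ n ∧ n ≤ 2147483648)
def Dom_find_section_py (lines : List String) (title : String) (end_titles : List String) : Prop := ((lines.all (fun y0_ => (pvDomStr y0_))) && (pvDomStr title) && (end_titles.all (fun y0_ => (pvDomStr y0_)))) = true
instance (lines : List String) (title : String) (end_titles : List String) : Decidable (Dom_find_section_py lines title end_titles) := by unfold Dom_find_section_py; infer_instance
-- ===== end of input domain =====

-- B replaces A's two sequential scans (title search, then indexed end-title scan, then a slice)
-- with one pass holding a started-flag and an accumulator: objective 'simpler'.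

-- ===== PORT A =====
-- first loop of A: enumerate lines, start = i + 1 at the first line containing title, else -1
def pvFindStartA (title : String) : List String → Int → Int
  | [], _ => -1
  | x :: xs, i => if PySem.Str.isIn title x then i + 1 else pvFindStartA title xs (i + 1)

-- second loop of A: for i over the range, end = first i whose line contains an end title, else len(lines)
def pvFindEndA (lines : List String) (end_titles : List String) : List Int → Int
  | [] => (lines.length : Int)
  | i :: rest =>
    if end_titles.any (fun t => PySem.Str.isIn t (PySem.List.pyGetD lines i "")) then i
    else pvFindEndA lines end_titles rest

def find_section_py (lines : List String) (title : String) (end_titles : List String) : List String :=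
  let start := pvFindStartA title lines 0
  if start < 0 then []
  else
    let e := pvFindEndA lines end_titles (PySem.List.pyRange start (lines.length : Int) 1)
    PySem.List.slice lines (some start) (some e)

-- ===== PORT B =====
-- single pass with a started-flag; accumulation expressed by structural recursion (append → cons on return)
def pvScanB (title : String) (end_titles : List String) : List String → Bool → List String
  | [], _ => []
  | x :: xs, started =>
    if started then
      if end_titles.any (fun t => PySem.Str.isIn t x) then []
      else x :: pvScanB title end_titles xs true
    else if PySem.Str.isIn title x then pvScanB title end_titles xs true
    else pvScanB title end_titles xs false

def find_section_py_alt (lines : List String) (title : String) (end_titles : List String) : List String :=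
  pvScanB title end_titles lines false

-- ===== PRECONDITION & SPEC =====
def Spec_find_section_py (lines : List String) (title : String) (end_titles : List String) (out : List String) : Prop := out = find_section_py_alt lines title end_titles
instance (lines : List String) (title : String) (end_titles : List String) (out : List String) : Decidable (Spec_find_section_py lines title end_titles out) := by unfold Spec_find_section_py; infer_instance

-- ===== CLAIM (what is proved, stated in full; the proofs are below) =====
def Claim_equal_find_section_py : Prop := ∀ (lines : List String) (title : String) (end_titles : List String), Dom_find_section_py lines title end_titles → Spec_find_section_py lines title end_titles (find_section_py lines title end_titles)

-- ===== LEMMAS AND PROOFS =====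

-- A's first loop, characterised by findIdx?
theorem pvFindStartA_eq (title : String) (xs : List String) (i : Int) :
    pvFindStartA title xs i =
      match xs.findIdx? (fun x => PySem.Str.isIn title x) with
      | none => -1
      | some k => i + k + 1 := by
  induction xs generalizing i with
  | nil => simp [pvFindStartA]
  | cons x xs ih =>
    simp only [pvFindStartA, List.findIdx?_cons]
    by_cases h : PySem.Str.isIn title x = true
    · rw [if_pos h, if_pos h]; simp
    · rw [if_neg h, if_neg h, ih]
      cases hf : xs.findIdx? (fun x => PySem.Str.isIn title x) with
      | none => simp
      | some k => simp; ring

-- B once started is takeWhile of the not-an-end-title predicate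
theorem pvScanB_started (title : String) (end_titles : List String) (xs : List String) :
    pvScanB title end_titles xs true =
      xs.takeWhile (fun x => !(end_titles.any (fun t => PySem.Str.isIn t x))) := by
  induction xs with
  | nil => rfl
  | cons x xs ih =>
    simp only [pvScanB, List.takeWhile_cons, ih]
    by_cases h : (end_titles.any (fun t => PySem.Str.isIn t x)) = true
    · rw [if_pos h, h]; simp
    · rw [if_neg h, eq_false_of_ne_true h]; simp

-- bounds for A's second loop over a range starting at s
theorem pvFindEndA_bounds (lines : List String) (end_titles : List String) (s : Nat)
    (hs : s ≤ lines.length) :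
    (s : Int) ≤ pvFindEndA lines end_titles (PySem.List.pyRange (s : Int) (lines.length : Int) 1) ∧
    pvFindEndA lines end_titles (PySem.List.pyRange (s : Int) (lines.length : Int) 1) ≤ (lines.length : Int) := by
  induction hn : lines.length - s generalizing s with
  | zero =>
    have hse : s = lines.length := by omega
    subst hse
    rw [PySem.List.pyRange_one_eq_nil (le_refl _)]
    simp [pvFindEndA]
  | succ n ih =>
    have hlt : s < lines.length := by omega
    rw [PySem.List.pyRange_one_cons (by exact_mod_cast hlt)]
    simp only [pvFindEndA]
    split
    · exact ⟨le_refl _, by exact_mod_cast le_of_lt hlt⟩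
    · have hcast : ((s : Int) + 1) = ((s + 1 : Nat) : Int) := by push_cast; ring
      rw [hcast]
      have h := ih (s + 1) (by omega) (by omega)
      exact ⟨le_trans (by push_cast; omega) h.1, h.2⟩

-- A's second loop + slice, from index s, equals takeWhile on the dropped suffix
theorem pvEndSlice (lines : List String) (end_titles : List String) (s : Nat)
    (hs : s ≤ lines.length) :
    PySem.List.slice lines (some (s : Int))
        (some (pvFindEndA lines end_titles (PySem.List.pyRange (s : Int) (lines.length : Int) 1))) =
      (lines.drop s).takeWhile (fun x => !(end_titles.any (fun t => PySem.Str.isIn t x))) := by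
  induction hn : lines.length - s generalizing s with
  | zero =>
    have hse : s = lines.length := by omega
    subst hse
    rw [PySem.List.pyRange_one_eq_nil (le_refl _)]
    simp [pvFindEndA, PySem.List.slice_natCast]
  | succ n ih =>
    have hlt : s < lines.length := by omega
    rw [PySem.List.pyRange_one_cons (by exact_mod_cast hlt)]
    simp only [pvFindEndA]
    have hdrop : lines.drop s = lines[s] :: lines.drop (s + 1) := List.drop_eq_getElem_cons hlt
    rw [PySem.List.pyGetD_natCast, List.getD_eq_getElem _ _ hlt]
    by_cases hp : (end_titles.any (fun t => PySem.Str.isIn t lines[s])) = true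
    · rw [if_pos hp, PySem.List.slice_natCast, hdrop, List.takeWhile_cons, hp]
      simp
    · rw [if_neg hp]
      have hcast : ((s : Int) + 1) = ((s + 1 : Nat) : Int) := by push_cast; ring
      rw [hcast]
      have hb := pvFindEndA_bounds lines end_titles (s + 1) (by omega)
      set e := pvFindEndA lines end_titles
        (PySem.List.pyRange ((s + 1 : Nat) : Int) (lines.length : Int) 1) with he
      have h0e : (0 : Int) ≤ e := le_trans (by omega) hb.1
      have hslice := ih (s + 1) (by omega) (by omega)
      rw [← he] at hslice
      rw [PySem.List.slice_of_nonneg lines (by omega) h0e (by exact_mod_cast hs) hb.2]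
      rw [PySem.List.slice_of_nonneg lines (by omega) h0e
        (by exact_mod_cast Nat.succ_le_of_lt hlt) hb.2] at hslice
      have hsnat : ((s : Int)).toNat = s := by omega
      have hs1nat : (((s + 1 : Nat) : Int)).toNat = s + 1 := by omega
      have hse1 : s + 1 ≤ e.toNat := by omega
      rw [hsnat, hdrop]
      rw [hs1nat] at hslice
      have hstep : e.toNat - s = (e.toNat - (s + 1)) + 1 := by omega
      rw [hstep, List.take_succ_cons, hslice, List.takeWhile_cons, eq_false_of_ne_true hp]
      simp

-- B with the flag down, driven by where the title is first found
theorem pvScanB_notStarted (title : String) (end_titles : List String) (xs : List String) :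
    pvScanB title end_titles xs false =
      match xs.findIdx? (fun x => PySem.Str.isIn title x) with
      | none => []
      | some k =>
          (xs.drop (k + 1)).takeWhile (fun x => !(end_titles.any (fun t => PySem.Str.isIn t x))) := by
  induction xs with
  | nil => rfl
  | cons x xs ih =>
    simp only [pvScanB, List.findIdx?_cons]
    by_cases h : PySem.Str.isIn title x = true
    · rw [if_pos h, if_pos h]
      simp [pvScanB_started]
    · rw [if_neg h, if_neg h, ih]
      cases hf : xs.findIdx? (fun x => PySem.Str.isIn title x) with
      | none => simp
      | some k => simp

-- ===== VERDICT (by name: the statement is the Claim_ definition above) =====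
theorem find_section_py_spec : Claim_equal_find_section_py := by
  intro lines title end_titles _hdom
  unfold Spec_find_section_py find_section_py find_section_py_alt
  rw [pvScanB_notStarted, pvFindStartA_eq]
  cases hf : lines.findIdx? (fun x => PySem.Str.isIn title x) with
  | none => simp
  | some k =>
    have hk : k < lines.length := (List.findIdx?_eq_some_iff_findIdx_eq.mp hf).1
    dsimp only
    rw [if_neg (not_lt.mpr (by positivity))]
    have hcast : ((0 : Int) + k + 1) = ((k + 1 : Nat) : Int) := by push_cast; ring
    rw [hcast]
    exact pvEndSlice lines end_titles (k + 1) (by omega)
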